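-- pv_equiv track=rewrite | github.com/Dark-Vol/ics-analysis | src/analytics/birnbaum_reliability.py | _remove_edges
-- ===== SOURCE A (Python) =====
-- from typing import Dict, List, Tuple, Optional, Set
--
-- def _remove_edges(network: Dict[str, List[str]], edges_to_remove: List[Tuple[str, str]]) -> Dict[str, List[str]]:
--     """
--     Видаляє вказані ребра з мережі
--
--     Args:
--         network: Початкова мережа
--         edges_to_remove: Список ребер для видалення
--
--     Returns:
--         Мережа з видаленими ребрами
--     """
--     new_network = {}
--     for node, connections in network.items():
--         new_connections = []
--         for connection in connections:
--             if (node, connection) not in edges_to_remove: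
--                 new_connections.append(connection)
--         new_network[node] = new_connections
--
--     return new_network
-- ===== SOURCE B (Python) =====
-- def _remove_edges(network, edges_to_remove):
--     new_network = {node: list(connections) for node, connections in network.items()}
--     for edge in edges_to_remove:
--         u, v = edge[0], edge[1]
--         if u in new_network:
--             new_network[u] = [c for c in new_network[u] if c != v]
--     return new_network
-- ===== Notes on version B (the rewrite author's own statement) =====
-- stated objective: faster
-- what changed: B copies the network once and then traverses the removal list, rebuilding only the affected node's connection list per edge, instead of A's node-by-node scan that checks every connection against the whole edge-removal list.
import Mathlib
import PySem

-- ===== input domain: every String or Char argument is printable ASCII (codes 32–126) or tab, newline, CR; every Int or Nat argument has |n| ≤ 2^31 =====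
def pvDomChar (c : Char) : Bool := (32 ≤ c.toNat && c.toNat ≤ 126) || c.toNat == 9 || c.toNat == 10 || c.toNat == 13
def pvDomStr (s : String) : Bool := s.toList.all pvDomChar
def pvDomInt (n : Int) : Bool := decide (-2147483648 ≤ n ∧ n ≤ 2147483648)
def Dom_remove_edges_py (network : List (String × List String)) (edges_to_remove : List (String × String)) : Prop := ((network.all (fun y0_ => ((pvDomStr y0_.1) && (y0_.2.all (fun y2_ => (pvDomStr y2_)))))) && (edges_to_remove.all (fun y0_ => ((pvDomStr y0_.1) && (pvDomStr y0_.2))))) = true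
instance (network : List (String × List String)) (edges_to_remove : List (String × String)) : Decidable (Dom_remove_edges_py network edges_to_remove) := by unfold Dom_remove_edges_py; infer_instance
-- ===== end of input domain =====

-- B traverses the edge-removal list (one rebuild of the affected node's list per edge)
-- instead of A's node×connection scan against the whole edge list; return values proved equal.

-- ===== PORT A =====
-- literal port of A: build new_network by iterating the network's items, keeping each
-- connection whose (node, connection) pair is not in edges_to_remove
def remove_edges_py (network : List (String × List String)) (edges_to_remove : List (String × String)) : List (String × List String) :=
  (network.foldl
    (fun (d : PySem.Dict String (List String)) nc =>
      d.insert nc.1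
        (nc.2.foldl
          (fun acc c => if edges_to_remove.contains (nc.1, c) then acc else acc ++ [c]) []))
    PySem.Dict.empty).items

-- ===== PORT B =====
-- literal port of B: copy the network into a dict, then for each edge (u, v), if u is a key,
-- rebuild its connection list dropping every occurrence of v
def remove_edges_py_alt (network : List (String × List String)) (edges_to_remove : List (String × String)) : List (String × List String) :=
  (edges_to_remove.foldl
    (fun (d : PySem.Dict String (List String)) uv =>
      if d.contains uv.1 then d.insert uv.1 ((d.getD uv.1 []).filter (fun c => c != uv.2)) else d)
    (network.foldl (fun (d : PySem.Dict String (List String)) nc => d.insert nc.1 nc.2)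
      PySem.Dict.empty)).items

-- ===== PRECONDITION & SPEC =====
def Spec_remove_edges_py (network : List (String × List String)) (edges_to_remove : List (String × String)) (out : List (String × List String)) : Prop := out = remove_edges_py_alt network edges_to_remove
instance (network : List (String × List String)) (edges_to_remove : List (String × String)) (out : List (String × List String)) : Decidable (Spec_remove_edges_py network edges_to_remove out) := by unfold Spec_remove_edges_py; infer_instance

-- ===== CLAIM (what is proved, stated in full; the proofs are below) =====
def Claim_equal_remove_edges_py : Prop := ∀ (network : List (String × List String)) (edges_to_remove : List (String × String)), Dom_remove_edges_py network edges_to_remove → Spec_remove_edges_py network edges_to_remove (remove_edges_py network edges_to_remove)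

-- ===== LEMMAS AND PROOFS =====

-- the per-entry value transformation both programs compute
def pvFilt (edges : List (String × String)) (p : String × List String) : String × List String :=
  (p.1, p.2.filter (fun c => !(edges.contains (p.1, c))))

-- A's inner append loop is a filter
theorem pv_inner_filter (edges : List (String × String)) (n : String) (cs acc : List String) :
    cs.foldl (fun a c => if edges.contains (n, c) then a else a ++ [c]) acc
      = acc ++ cs.filter (fun c => !(edges.contains (n, c))) := by
  induction cs generalizing acc with
  | nil => simp
  | cons c cs ih =>
    rw [List.foldl_cons, List.filter_cons]
    cases h : edges.contains (n, c) with
    | true =>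
      rw [if_pos rfl, if_neg (by simp)]
      exact ih acc
    | false =>
      rw [if_neg (by simp), if_pos (by simp), ih, List.append_assoc, List.singleton_append]

-- keys of a literal dict are the firsts of its items
theorem pv_keys_map (edges : List (String × String)) (l : List (String × List String)) :
    (PySem.Dict.mk (l.map (pvFilt edges)) : PySem.Dict String (List String)).keys = l.map Prod.fst := by
  simp only [PySem.Dict.keys, List.map_map]
  apply List.map_congr_left
  intro q _
  rfl

-- inserting a pvFilt-image value commutes with mapping pvFilt over the items
theorem pv_insert_map (edges : List (String × String)) (d : PySem.Dict String (List String))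
    (p : String × List String) :
    (PySem.Dict.mk (d.items.map (pvFilt edges))).insert p.1 (pvFilt edges p).2
      = PySem.Dict.mk ((d.insert p.1 p.2).items.map (pvFilt edges)) := by
  apply PySem.Dict.ext
  have hkeys : (PySem.Dict.mk (d.items.map (pvFilt edges)) : PySem.Dict String (List String)).contains p.1 = d.contains p.1 := by
    rw [PySem.Dict.contains_eq_decide_mem_keys, PySem.Dict.contains_eq_decide_mem_keys,
      pv_keys_map]
    simp [PySem.Dict.keys]
  rw [PySem.Dict.items_insert, PySem.Dict.items_insert, hkeys]
  by_cases h : d.contains p.1 = true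
  · simp only [h, if_true]
    show (d.items.map (pvFilt edges)).map _ = (d.items.map _).map (pvFilt edges)
    rw [List.map_map, List.map_map]
    apply List.map_congr_left
    intro q _
    simp only [Function.comp_apply]
    by_cases hq : (q.1 == p.1) = true
    · have h1 : ((pvFilt edges q).1 == p.1) = true := hq
      simp only [h1, hq, if_true]
      simp only [beq_iff_eq] at hq
      simp [pvFilt, hq]
    · have h1 : ((pvFilt edges q).1 == p.1) = false := by simpa using hq
      simp [h1, hq]
  · simp only [h, if_false]
    show (d.items.map (pvFilt edges)) ++ _ = (d.items ++ [(p.1, p.2)]).map (pvFilt edges)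
    simp [pvFilt]

-- inserting the filtered values into an empty dict = inserting raw values, then mapping pvFilt
theorem pv_foldl_insert_map (edges : List (String × String))
    (l : List (String × List String)) (d : PySem.Dict String (List String)) :
    l.foldl (fun d nc => d.insert nc.1 (pvFilt edges nc).2) (PySem.Dict.mk (d.items.map (pvFilt edges)))
      = PySem.Dict.mk ((l.foldl (fun d nc => d.insert nc.1 nc.2) d).items.map (pvFilt edges)) := by
  induction l generalizing d with
  | nil => rfl
  | cons p l ih =>
    simp only [List.foldl_cons]
    rw [pv_insert_map edges d p, ih]

-- one step of B's edge loop, on a dict with distinct keys, is one conditional filter per item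
theorem pv_step_items (u v : String) (d : PySem.Dict String (List String)) (hnd : d.keys.Nodup) :
    (if d.contains u then d.insert u ((d.getD u []).filter (fun c => c != v)) else d).items
      = d.items.map (fun p => if p.1 == u then (p.1, p.2.filter (fun c => c != v)) else p) := by
  cases h : d.contains u with
  | true =>
    rw [if_pos rfl, PySem.Dict.items_insert, h, if_pos rfl]
    apply List.map_congr_left
    intro q hq
    by_cases hqu : (q.1 == u) = true
    · rw [if_pos hqu, if_pos hqu]
      have hqe : q.1 = u := by simpa using hqu
      have hmem : (u, q.2) ∈ d.items := by rw [← hqe]; exact hq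
      rw [PySem.Dict.getD_of_mem_items d hmem hnd, hqe]
    · rw [if_neg hqu, if_neg hqu]
  | false =>
    rw [if_neg (by simp)]
    have hnk : u ∉ d.keys := by
      rw [PySem.Dict.contains_eq_decide_mem_keys] at h
      simpa using h
    conv_lhs => rw [← List.map_id d.items]
    apply List.map_congr_left
    intro q hq
    have hne : (q.1 == u) = false := by
      simp only [beq_eq_false_iff_ne]
      intro he
      exact hnk (he ▸ PySem.Dict.mem_keys_of_mem_items d hq)
    rw [if_neg (by simp [hne]), id]

-- B's edge loop over a dict with distinct keys filters all edges out of every entry at once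
theorem pv_edges_loop (edges : List (String × String)) (d : PySem.Dict String (List String))
    (hnd : d.keys.Nodup) :
    (edges.foldl
      (fun d uv =>
        if d.contains uv.1 then d.insert uv.1 ((d.getD uv.1 []).filter (fun c => c != uv.2)) else d)
      d).items = d.items.map (pvFilt edges) := by
  induction edges generalizing d with
  | nil =>
    rw [List.foldl_nil]
    conv_lhs => rw [← List.map_id d.items]
    apply List.map_congr_left
    intro q _
    simp [pvFilt]
  | cons e rest ih =>
    obtain ⟨u, v⟩ := e
    simp only [List.foldl_cons]
    have hitems := pv_step_items u v d hnd
    set d1 := if d.contains u then d.insert u ((d.getD u []).filter (fun c => c != v)) else d with hd1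
    have hkeys1 : d1.keys = d.keys := by
      simp only [PySem.Dict.keys, hitems, List.map_map]
      apply List.map_congr_left
      intro q _
      simp only [Function.comp_apply]
      split <;> rfl
    rw [ih d1 (by rw [hkeys1]; exact hnd), hitems, List.map_map]
    apply List.map_congr_left
    intro q _
    simp only [Function.comp_apply, pvFilt]
    by_cases hq : (q.1 == u) = true
    · simp only [hq, if_true, List.filter_filter]
      have hqe : q.1 = u := by simpa using hq
      congr 1
      apply List.filter_congr
      intro c _
      have hbe : ((q.1, c) == (u, v)) = (c == v) := by
        cases hc : (c == v) <;> simp [hqe, Prod.ext_iff, hc, (by simpa using hc : _)]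
      cases hc : (c == v) <;>
        cases hr : rest.contains (q.1, c) <;>
          simp_all [List.contains_cons, bne]
    · simp only [hq, if_false]
      have hne : q.1 ≠ u := by simpa using hq
      congr 1
      apply List.filter_congr
      intro c _
      have hbe : ((q.1, c) == (u, v)) = false := by
        simp [Prod.ext_iff, hne]
      cases hr : rest.contains (q.1, c) <;>
        simp_all [hbe]

-- the base dict built by inserting pairs starting from empty has distinct keys
theorem pv_base_nodup (l : List (String × List String)) :
    ((l.foldl (fun (d : PySem.Dict String (List String)) nc => d.insert nc.1 nc.2)
      PySem.Dict.empty).keys).Nodup :=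
  PySem.Dict.nodup_keys_foldl_insert_key l Prod.fst (fun _ nc => nc.2) PySem.Dict.empty
    PySem.Dict.nodup_keys_empty

-- ===== VERDICT (by name: the statement is the Claim_ definition above) =====
theorem remove_edges_py_spec : Claim_equal_remove_edges_py := by
  intro network edges _
  show remove_edges_py network edges = remove_edges_py_alt network edges
  unfold remove_edges_py remove_edges_py_alt
  have hA : (fun (d : PySem.Dict String (List String)) (nc : String × List String) =>
      d.insert nc.1 (nc.2.foldl (fun acc c => if edges.contains (nc.1, c) then acc else acc ++ [c]) []))
      = (fun d nc => d.insert nc.1 (pvFilt edges nc).2) := by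
    funext d nc
    rw [pv_inner_filter]
    rfl
  rw [hA]
  have hbase := pv_foldl_insert_map edges network PySem.Dict.empty
  have hempty : (PySem.Dict.mk ((PySem.Dict.empty : PySem.Dict String (List String)).items.map (pvFilt edges)))
      = (PySem.Dict.empty : PySem.Dict String (List String)) := by
    apply PySem.Dict.ext
    rfl
  rw [hempty] at hbase
  rw [hbase, pv_edges_loop edges _ (pv_base_nodup network)]
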